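-- pv_equiv track=rewrite | github.com/vicious987/old_uni_assignments | python_basic/l8/wpr.py | d1_to_d2
-- ===== SOURCE A (Python) =====
-- def translate(word, d):
--     translation = []
--     for x in d:
--         if x[0] == word:
--             translation.append(x[1])
--     return translation
--
-- def d1_to_d2(dict1, dict2):
--     d = {}
--     for x in dict1:
--         d[x[0]] = []
--     for x in dict1:
--         d[x[0]].append(x[1])
--     for entry in d:
--         t = []
--         for word in d[entry]:
--             t.extend(translate(word,dict2))
--             d[entry] = t
--     return d
-- ===== SOURCE B (Python) =====
-- def d1_to_d2(dict1, dict2):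
--     # Single pass over dict1: for each (word, tr) pair grow word's bucket
--     # directly with the dict2 matches of tr (no intermediate dict of
--     # d1-translations, no separate init/append/translate phases).
--     result = {}
--     for word, tr in dict1:
--         bucket = result.setdefault(word, [])
--         for x in dict2:
--             if x[0] == tr:
--                 bucket.append(x[1])
--     return result
-- ===== Notes on version B (the rewrite author's own statement) =====
-- stated objective: simpler
-- what changed: A's three phases (init keys, group dict1 values per key, then translate each grouped list via a helper) are collapsed into one direct pass over dict1 that grows each word's bucket with its dict2 matches via setdefault, with no intermediate grouping dict and no translate helper.
import Mathlib
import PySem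

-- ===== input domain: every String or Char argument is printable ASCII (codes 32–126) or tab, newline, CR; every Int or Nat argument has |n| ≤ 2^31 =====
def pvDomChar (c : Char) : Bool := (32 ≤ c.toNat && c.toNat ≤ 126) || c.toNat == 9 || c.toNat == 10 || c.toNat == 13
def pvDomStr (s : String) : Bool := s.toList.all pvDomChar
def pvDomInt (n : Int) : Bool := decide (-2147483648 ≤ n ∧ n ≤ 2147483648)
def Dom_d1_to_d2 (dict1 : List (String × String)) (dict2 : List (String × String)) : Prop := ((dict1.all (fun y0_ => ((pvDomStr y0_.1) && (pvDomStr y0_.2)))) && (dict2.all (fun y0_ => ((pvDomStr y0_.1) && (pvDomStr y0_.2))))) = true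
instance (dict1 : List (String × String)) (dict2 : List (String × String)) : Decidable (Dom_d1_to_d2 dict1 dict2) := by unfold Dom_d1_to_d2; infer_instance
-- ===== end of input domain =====

-- B replaces A's three-phase construction (init keys, group dict1 values per key via a dict,
-- translatePy each grouped list with a helper) by one direct pass over dict1 growing each
-- word's bucket with its dict2 matches (objective: simpler).

-- ===== PORT A =====
-- Python helper `translate` (renamed: Mathlib already defines `translate`)
def translatePy (word : String) (d : List (String × String)) : List String :=
  d.foldl (fun translation x => if x.1 == word then translation ++ [x.2] else translation) []

def d1_to_d2 (dict1 : List (String × String)) (dict2 : List (String × String)) : List (String × List String) :=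
  -- d = {}; for x in dict1: d[x[0]] = []
  let d : PySem.Dict String (List String) :=
    dict1.foldl (fun d x => d.insert x.1 ([] : List String)) PySem.Dict.empty
  -- for x in dict1: d[x[0]].append(x[1])   (key always present after the first loop,
  -- so modify's default [] is never used and no KeyError can occur)
  let d := dict1.foldl (fun d x => d.modify x.1 [] (fun l => l ++ [x.2])) d
  -- for entry in d: t = []; for word in d[entry]: t.extend(translatePy(word, dict2)); d[entry] = t
  let d := d.keys.foldl
    (fun d entry =>
      ((d.getD entry []).foldl
        (fun (st : PySem.Dict String (List String) × List String) word =>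
          let t := st.2 ++ translatePy word dict2
          (st.1.insert entry t, t))
        (d, ([] : List String))).1)
    d
  d.items

-- ===== PORT B =====
def d1_to_d2_alt (dict1 : List (String × String)) (dict2 : List (String × String)) : List (String × List String) :=
  -- result = {}
  -- for word, tr in dict1:
  --     bucket = result.setdefault(word, [])
  --     for x in dict2:
  --         if x[0] == tr: bucket.append(x[1])
  (dict1.foldl
    (fun res p =>
      let res := res.setdefault p.1 ([] : List String)
      dict2.foldl
        (fun res x => if x.1 == p.2 then res.modify p.1 [] (fun l => l ++ [x.2]) else res)
        res)
    PySem.Dict.empty).items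

-- ===== PRECONDITION & SPEC =====
def Spec_d1_to_d2 (dict1 : List (String × String)) (dict2 : List (String × String)) (out : List (String × List String)) : Prop := out = d1_to_d2_alt dict1 dict2
instance (dict1 : List (String × String)) (dict2 : List (String × String)) (out : List (String × List String)) : Decidable (Spec_d1_to_d2 dict1 dict2 out) := by unfold Spec_d1_to_d2; infer_instance

-- ===== CLAIM (what is proved, stated in full; the proofs are below) =====
def Claim_equal_d1_to_d2 : Prop := ∀ (dict1 : List (String × String)) (dict2 : List (String × String)), Dom_d1_to_d2 dict1 dict2 → Spec_d1_to_d2 dict1 dict2 (d1_to_d2 dict1 dict2)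

-- ===== LEMMAS AND PROOFS =====

/-- What one dict1 translation contributes: the dict2 values whose key equals it. -/
def pvTr (dict2 : List (String × String)) (w : String) : List String :=
  (dict2.filter (fun x => x.1 == w)).map (·.2)

/-- The common specification value of both programs at key `k`. -/
def pvSpecVal (dict1 dict2 : List (String × String)) (k : String) : List String :=
  dict1.flatMap (fun p => if p.1 = k then pvTr dict2 p.2 else [])

theorem translate_eq (w : String) (d : List (String × String)) :
    translatePy w d = pvTr d w := by
  unfold translatePy pvTr
  simpa using PySem.List.foldl_append_if (fun x : String × String => x.1 == w) (fun x => x.2) d []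

theorem filter_map_flatMap (k : String) (g : String → List String) :
    ∀ (l : List (String × String)),
      ((l.filter (fun p => p.1 == k)).map (·.2)).flatMap g
        = l.flatMap (fun p => if p.1 = k then g p.2 else []) := by
  intro l
  induction l with
  | nil => rfl
  | cons p l ih =>
    by_cases h : p.1 = k <;> simp [h, ih]

theorem set_update_self (m : List String) :
    PySem.Set.update (PySem.Set.ofList m) m = PySem.Set.ofList m := by
  rw [PySem.Set.update_eq_append_filter]
  have h : (PySem.Set.ofList m).filter (fun y => !(PySem.Set.ofList m).contains y) = [] := by
    rw [List.filter_eq_nil_iff]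
    intro y hy
    simp [PySem.Set.contains_eq_listContains, hy]
  rw [h, List.append_nil]

theorem get?_of_mem_keys (d : PySem.Dict String (List String)) (k : String)
    (h : k ∈ d.keys) : d.get? k = some (d.getD k []) := by
  have hc : d.contains k = true := (PySem.Dict.contains_iff_mem_keys d k).2 h
  cases hg : d.get? k with
  | none =>
    rw [PySem.Dict.get?_eq_none_iff_contains] at hg
    rw [hg] at hc; cases hc
  | some v => rw [PySem.Dict.getD_eq_get?_getD, hg]; rfl

-- ---- A, phase 1: every value is [] ----
theorem a1_getD (l : List (String × String)) :
    ∀ (d : PySem.Dict String (List String)), (∀ k, d.getD k [] = []) →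
      ∀ k, (l.foldl (fun d x => d.insert x.1 ([] : List String)) d).getD k [] = [] := by
  induction l with
  | nil => intro d hd k; exact hd k
  | cons x l ih =>
    intro d hd k
    refine ih (d.insert x.1 []) (fun k' => ?_) k
    rw [PySem.Dict.getD_insert]
    split <;> [rfl; exact hd k']

-- ---- A, phase 3 inner loop: t accumulates, d[entry] is overwritten each step ----
theorem a3_inner (dict2 : List (String × String)) (entry : String) :
    ∀ (l : List String) (d : PySem.Dict String (List String)) (t0 : List String),
      (l.foldl
        (fun (st : PySem.Dict String (List String) × List String) word =>
          let t := st.2 ++ translatePy word dict2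
          (st.1.insert entry t, t))
        (d, t0))
      = if l = [] then (d, t0)
        else (d.insert entry (t0 ++ l.flatMap (fun w => translatePy w dict2)),
              t0 ++ l.flatMap (fun w => translatePy w dict2)) := by
  intro l
  induction l with
  | nil => intro d t0; rfl
  | cons w l ih =>
    intro d t0
    rw [List.foldl_cons, ih]
    by_cases h : l = []
    · subst h; simp
    · simp only [h, if_false, List.cons_ne_nil, if_false, List.flatMap_cons,
        PySem.Dict.insert_insert_self, List.append_assoc]

-- ---- A, phase 3 one step ----
theorem a3_step (dict2 : List (String × String)) (entry : String)
    (d : PySem.Dict String (List String)) (k : String) :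
    (((d.getD entry []).foldl
        (fun (st : PySem.Dict String (List String) × List String) word =>
          let t := st.2 ++ translatePy word dict2
          (st.1.insert entry t, t))
        (d, ([] : List String))).1).get? k
      = if k = entry then (d.get? entry).map (fun v => v.flatMap (fun w => translatePy w dict2))
        else d.get? k := by
  rw [a3_inner]
  cases hg : d.get? entry with
  | none =>
    have hd : d.getD entry [] = [] := by rw [PySem.Dict.getD_eq_get?_getD, hg]; rfl
    rw [hd, if_pos rfl]
    by_cases hk : k = entry
    · subst hk; simp [hg]
    · simp [hk]
  | some v =>
    have hd : d.getD entry [] = v := by rw [PySem.Dict.getD_eq_get?_getD, hg]; rfl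
    rw [hd]
    by_cases hv : v = []
    · subst hv
      rw [if_pos rfl]
      by_cases hk : k = entry
      · subst hk; simp [hg]
      · simp [hk]
    · rw [if_neg hv]
      simp only [PySem.Dict.get?_insert, List.nil_append]
      split
      · simp
      · rfl

theorem a3_step_keys (dict2 : List (String × String)) (entry : String)
    (d : PySem.Dict String (List String)) :
    (((d.getD entry []).foldl
        (fun (st : PySem.Dict String (List String) × List String) word =>
          let t := st.2 ++ translatePy word dict2
          (st.1.insert entry t, t))
        (d, ([] : List String))).1).keys = d.keys := by
  rw [a3_inner]
  cases hg : d.get? entry with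
  | none =>
    have hd : d.getD entry [] = [] := by rw [PySem.Dict.getD_eq_get?_getD, hg]; rfl
    rw [hd, if_pos rfl]
  | some v =>
    have hd : d.getD entry [] = v := by rw [PySem.Dict.getD_eq_get?_getD, hg]; rfl
    rw [hd]
    by_cases hv : v = []
    · subst hv; rw [if_pos rfl]
    · rw [if_neg hv]
      have hc : d.contains entry = true := by
        cases hcon : d.contains entry
        · rw [← PySem.Dict.get?_eq_none_iff_contains] at hcon; rw [hcon] at hg; cases hg
        · rfl
      exact PySem.Dict.keys_insert_of_contains d _ hc

-- ---- A, phase 3 whole loop ----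
theorem a3_fold (dict2 : List (String × String)) :
    ∀ (ks : List String) (d : PySem.Dict String (List String)) (k : String), ks.Nodup →
      (ks.foldl
        (fun d entry =>
          ((d.getD entry []).foldl
            (fun (st : PySem.Dict String (List String) × List String) word =>
              let t := st.2 ++ translatePy word dict2
              (st.1.insert entry t, t))
            (d, ([] : List String))).1)
        d).get? k
      = if k ∈ ks then (d.get? k).map (fun v => v.flatMap (fun w => translatePy w dict2))
        else d.get? k := by
  intro ks
  induction ks with
  | nil => intro d k _; simp
  | cons e ks ih =>
    intro d k hnd
    rw [List.foldl_cons, ih _ _ (List.Nodup.of_cons hnd)]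
    by_cases hk : k ∈ ks
    · have hke : k ≠ e := by rintro rfl; exact (List.nodup_cons.1 hnd).1 hk
      rw [if_pos hk, if_pos (List.mem_cons_of_mem _ hk), a3_step, if_neg hke]
    · rw [if_neg hk]
      by_cases hke : k = e
      · subst hke
        rw [a3_step, if_pos rfl, if_pos (List.mem_cons_self ..)]
      · rw [a3_step, if_neg hke, if_neg (by simp [hke, hk])]

-- ---- A, phase 3 whole loop: keys are unchanged ----
theorem a3_fold_keys (dict2 : List (String × String)) :
    ∀ (ks : List String) (d : PySem.Dict String (List String)),
      (ks.foldl
        (fun d entry =>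
          ((d.getD entry []).foldl
            (fun (st : PySem.Dict String (List String) × List String) word =>
              let t := st.2 ++ translatePy word dict2
              (st.1.insert entry t, t))
            (d, ([] : List String))).1)
        d).keys = d.keys := by
  intro ks
  induction ks with
  | nil => intro d; rfl
  | cons e ks ih =>
    intro d
    rw [List.foldl_cons, ih, a3_step_keys]

-- ---- B, inner loop over dict2 ----
theorem b_inner (w tr : String) :
    ∀ (l : List (String × String)) (res : PySem.Dict String (List String)) (k : String),
      (l.foldl
        (fun res x => if x.1 == tr then res.modify w [] (fun l => l ++ [x.2]) else res)
        res).getD k []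
      = res.getD k [] ++ (if k = w then (l.filter (fun x => x.1 == tr)).map (·.2) else []) := by
  intro l
  induction l with
  | nil => intro res k; simp
  | cons x l ih =>
    intro res k
    rw [List.foldl_cons]
    cases hx : (x.1 == tr) with
    | false =>
      rw [if_neg (by simp [hx]), ih]
      simp [List.filter_cons, hx]
    | true =>
      rw [if_pos (by simp_all), ih]
      by_cases hk : k = w
      · subst hk
        simp [hx, PySem.Dict.getD_modify]
      · simp [hx, hk, PySem.Dict.getD_modify]

theorem getD_setdefault_nil (res : PySem.Dict String (List String)) (w k : String) :
    (res.setdefault w ([] : List String)).getD k [] = res.getD k [] := by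
  by_cases hk : k = w
  · subst hk; exact PySem.Dict.getD_setdefault_self res k [] []
  · rw [PySem.Dict.getD_eq_get?_getD, PySem.Dict.get?_setdefault_of_ne res _ hk,
      ← PySem.Dict.getD_eq_get?_getD]

-- ---- B, whole loop: values ----
theorem b_fold_getD (dict2 : List (String × String)) :
    ∀ (l : List (String × String)) (res : PySem.Dict String (List String)) (k : String),
      (l.foldl
        (fun res p =>
          let res := res.setdefault p.1 ([] : List String)
          dict2.foldl
            (fun res x => if x.1 == p.2 then res.modify p.1 [] (fun l => l ++ [x.2]) else res)
            res)
        res).getD k []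
      = res.getD k [] ++ pvSpecVal l dict2 k := by
  intro l
  induction l with
  | nil => intro res k; simp [pvSpecVal]
  | cons p l ih =>
    intro res k
    rw [List.foldl_cons, ih]
    show (dict2.foldl _ (res.setdefault p.1 [])).getD k [] ++ _ = _
    rw [b_inner, getD_setdefault_nil]
    unfold pvSpecVal pvTr
    rw [List.flatMap_cons, ← List.append_assoc]
    congr 1
    by_cases hk : p.1 = k
    · subst hk; simp
    · rw [if_neg (fun h => hk h.symm), if_neg hk, List.append_nil]

-- ---- B, inner loop keys ----
theorem b_inner_keys (w tr : String) :
    ∀ (l : List (String × String)) (res : PySem.Dict String (List String)),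
      res.contains w = true →
      (l.foldl
        (fun res x => if x.1 == tr then res.modify w [] (fun l => l ++ [x.2]) else res)
        res).keys = res.keys := by
  intro l
  induction l with
  | nil => intro res _; rfl
  | cons x l ih =>
    intro res hc
    rw [List.foldl_cons]
    cases hx : (x.1 == tr) with
    | false => rw [if_neg (by simp [hx]), ih _ hc]
    | true =>
      rw [if_pos (by simp_all),
        ih _ (by rw [PySem.Dict.contains_modify]; simp),
        PySem.Dict.keys_modify, PySem.Dict.keys_insert_of_contains _ _ hc]

-- ---- B, whole loop keys ----
theorem b_fold_keys (dict2 : List (String × String)) :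
    ∀ (l : List (String × String)) (res : PySem.Dict String (List String)),
      (l.foldl
        (fun res p =>
          let res := res.setdefault p.1 ([] : List String)
          dict2.foldl
            (fun res x => if x.1 == p.2 then res.modify p.1 [] (fun l => l ++ [x.2]) else res)
            res)
        res).keys = PySem.Set.update res.keys (l.map (·.1)) := by
  intro l
  induction l with
  | nil => intro res; rfl
  | cons p l ih =>
    intro res
    rw [List.foldl_cons, ih, List.map_cons, PySem.Set.update_cons]
    congr 1
    show (dict2.foldl _ (res.setdefault p.1 [])).keys = _
    rw [b_inner_keys _ _ _ _ (by rw [PySem.Dict.contains_setdefault]; simp),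
      PySem.Dict.keys_setdefault]
    by_cases hc : res.contains p.1 = true
    · rw [if_pos hc,
        PySem.Set.add_of_mem ((PySem.Dict.contains_iff_mem_keys res p.1).1 hc)]
    · have hc' : res.contains p.1 = false := by cases h : res.contains p.1; rfl; exact absurd h hc
      rw [if_neg hc,
        PySem.Set.add_of_not_mem (fun hm => by
          rw [(PySem.Dict.contains_iff_mem_keys res p.1).2 hm] at hc'; cases hc')]

-- ===== VERDICT (by name: the statement is the Claim_ definition above) =====
theorem d1_to_d2_spec : Claim_equal_d1_to_d2 := by
  intro dict1 dict2 _
  unfold Spec_d1_to_d2 d1_to_d2 d1_to_d2_alt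
  simp only []
  -- A, phase 1
  have h1keys : (dict1.foldl (fun d x => d.insert x.1 ([] : List String)) PySem.Dict.empty).keys
      = PySem.Set.ofList (dict1.map (·.1)) := by
    rw [PySem.Dict.keys_foldl_insert_key dict1 (·.1) (fun _ _ => ([] : List String))]
    rfl
  have h1getD : ∀ k, (dict1.foldl (fun d x => d.insert x.1 ([] : List String)) PySem.Dict.empty).getD k [] = [] :=
    a1_getD dict1 PySem.Dict.empty (fun _ => rfl)
  -- A, phase 2
  have h2keys : (dict1.foldl (fun d x => d.modify x.1 [] (fun l => l ++ [x.2]))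
        (dict1.foldl (fun d x => d.insert x.1 ([] : List String)) PySem.Dict.empty)).keys
      = PySem.Set.ofList (dict1.map (·.1)) := by
    rw [PySem.Dict.keys_foldl_modify_key dict1 (·.1) [] (fun _ _ l => l ++ [_]), h1keys]
    exact set_update_self _
  have h2nodup : (dict1.foldl (fun d x => d.modify x.1 [] (fun l => l ++ [x.2]))
        (dict1.foldl (fun d x => d.insert x.1 ([] : List String)) PySem.Dict.empty)).keys.Nodup := by
    rw [h2keys]; exact PySem.Set.nodup_ofList _
  have h2getD : ∀ k, (dict1.foldl (fun d x => d.modify x.1 [] (fun l => l ++ [x.2]))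
        (dict1.foldl (fun d x => d.insert x.1 ([] : List String)) PySem.Dict.empty)).getD k []
      = (dict1.filter (fun p => p.1 == k)).map (·.2) := by
    intro k
    rw [PySem.Dict.getD_foldl_modify_append, h1getD, List.nil_append]
  -- B
  have hBkeys : (dict1.foldl
        (fun res p =>
          let res := res.setdefault p.1 ([] : List String)
          dict2.foldl
            (fun res x => if x.1 == p.2 then res.modify p.1 [] (fun l => l ++ [x.2]) else res)
            res)
        PySem.Dict.empty).keys = PySem.Set.ofList (dict1.map (·.1)) := by
    rw [b_fold_keys]
    rfl
  have hBnodup : (dict1.foldl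
        (fun res p =>
          let res := res.setdefault p.1 ([] : List String)
          dict2.foldl
            (fun res x => if x.1 == p.2 then res.modify p.1 [] (fun l => l ++ [x.2]) else res)
            res)
        PySem.Dict.empty).keys.Nodup := by
    rw [hBkeys]; exact PySem.Set.nodup_ofList _
  -- keys of A's result
  have h3keys := a3_fold_keys dict2
    ((dict1.foldl (fun d x => d.modify x.1 [] (fun l => l ++ [x.2]))
        (dict1.foldl (fun d x => d.insert x.1 ([] : List String)) PySem.Dict.empty)).keys)
    (dict1.foldl (fun d x => d.modify x.1 [] (fun l => l ++ [x.2]))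
        (dict1.foldl (fun d x => d.insert x.1 ([] : List String)) PySem.Dict.empty))
  rw [PySem.Dict.items_eq_map_keys _ (by rw [h3keys]; exact h2nodup) ([] : List String),
      PySem.Dict.items_eq_map_keys _ hBnodup ([] : List String),
      h3keys, h2keys, hBkeys]
  refine List.map_congr_left (fun k hk => ?_)
  have hk2 : k ∈ (dict1.foldl (fun d x => d.modify x.1 [] (fun l => l ++ [x.2]))
        (dict1.foldl (fun d x => d.insert x.1 ([] : List String)) PySem.Dict.empty)).keys := by
    rw [h2keys]; exact hk
  have h3get := a3_fold dict2
    (PySem.Set.ofList (dict1.map (·.1)))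
    (dict1.foldl (fun d x => d.modify x.1 [] (fun l => l ++ [x.2]))
        (dict1.foldl (fun d x => d.insert x.1 ([] : List String)) PySem.Dict.empty))
    k (PySem.Set.nodup_ofList _)
  rw [if_pos hk, get?_of_mem_keys _ _ hk2, h2getD, Option.map_some] at h3get
  congr 1
  rw [PySem.Dict.getD_eq_get?_getD, h3get, Option.getD_some, b_fold_getD]
  show _ = [] ++ pvSpecVal dict1 dict2 k
  rw [List.nil_append]
  unfold pvSpecVal
  rw [← filter_map_flatMap k (pvTr dict2) dict1]
  congr 1
  funext w
  exact translate_eq w dict2
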